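-- pv_equiv track=rewrite | github.com/nyongja/Algorithm | Part2/Ch7 Binary Search/7-2.py | solution
-- ===== SOURCE A (Python) =====
-- def solution(m, rice_cake) :
--     rice_cake.sort()
--     start = 0
--     end = rice_cake[-1]
--     answer = 0
--
--     while start <= end :
--         cut = (start + end) // 2
--         length = 0
--
--         for i in rice_cake :
--             if i > cut :
--                 length += i - cut
--
--         if length == m :
--             answer = cut
--             return answer
--         elif length > m :
--             answer = cut
--             # 더 짧은 경우있는지 확인
--             start = cut + 1
--         else :
--             end = cut - 1
--     return answer
-- ===== SOURCE B (Python) =====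
-- def solution(m, rice_cake):
--     # Binary search on the cut height, but each evaluation is O(log n):
--     # prefix sums give the total cut at height h once the first cake taller
--     # than h is found by bisection in the sorted list.
--     rice_cake.sort()
--     n = len(rice_cake)
--     prefix = [0]
--     for x in rice_cake:
--         prefix.append(prefix[-1] + x)
--
--     def cut_total(h):
--         lo, hi = 0, n
--         while lo < hi:
--             mid = (lo + hi) // 2
--             if rice_cake[mid] > h:
--                 hi = mid
--             else:
--                 lo = mid + 1
--         return prefix[n] - prefix[lo] - (n - lo) * h
--
--     best = 0
--     lo, hi = 0, rice_cake[-1]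
--     while lo <= hi:
--         mid = (lo + hi) // 2
--         if cut_total(mid) >= m:
--             best = mid
--             lo = mid + 1
--         else:
--             hi = mid - 1
--     return best
-- ===== Notes on version B (the rewrite author's own statement) =====
-- stated objective: faster
-- what changed: Each step of the height search now evaluates the cut total in O(log n) via precomputed prefix sums plus bisection for the first cake taller than the candidate, instead of rescanning the whole list; the search keeps the best feasible height rather than early-returning on exact equality. Pre_ excludes only the empty list, on which A raises IndexError.
import Mathlib
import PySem

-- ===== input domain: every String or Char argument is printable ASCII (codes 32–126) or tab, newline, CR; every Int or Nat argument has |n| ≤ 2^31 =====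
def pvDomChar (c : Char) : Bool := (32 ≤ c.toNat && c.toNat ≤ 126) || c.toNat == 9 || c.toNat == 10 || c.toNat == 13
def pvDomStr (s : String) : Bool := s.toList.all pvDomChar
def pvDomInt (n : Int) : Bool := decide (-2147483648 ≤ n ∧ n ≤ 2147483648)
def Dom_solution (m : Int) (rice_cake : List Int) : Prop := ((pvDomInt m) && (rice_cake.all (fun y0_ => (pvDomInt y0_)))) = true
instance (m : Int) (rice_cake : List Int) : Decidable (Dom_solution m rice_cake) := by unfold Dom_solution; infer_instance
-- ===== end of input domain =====

-- B evaluates each candidate cut height in O(log n) via precomputed prefix sums plus a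
-- bisection for the first taller cake, instead of A's O(n) rescan per step, and keeps
-- the best feasible height instead of early-returning on exact equality; equivalence
-- is about the return value (both A and B sort the argument in place).

-- ===== PORT A =====
-- A's inner for-loop: length = sum over the list of (i - cut) for i > cut
def pvLen (a : List Int) (cut : Int) : Int :=
  a.foldl (fun length i => if cut < i then length + (i - cut) else length) 0

-- A's `while start <= end` binary search; the Nat argument is fuel making the
-- recursion structural (the interval shrinks each pass, so `(endv+1).toNat`
-- passes of fuel are never exhausted before the while-condition fails)
def solutionLoop (a : List Int) (m : Int) : Nat → Int → Int → Int → Int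
  | 0, _, _, answer => answer
  | fuel + 1, start, endv, answer =>
    if start ≤ endv then
      let cut := PySem.Int.floordiv (start + endv) 2
      let length := pvLen a cut
      if length = m then cut
      else if length > m then solutionLoop a m fuel (cut + 1) endv cut
      else solutionLoop a m fuel start (cut - 1) answer
    else answer

def solution (m : Int) (rice_cake : List Int) : Int :=
  let a := PySem.List.sorted rice_cake (fun x => x) false
  let endv := PySem.List.pyGetD a (-1) 0
  solutionLoop a m (endv + 1).toNat 0 endv 0

-- ===== PORT B =====
-- B's prefix list: prefix = [0]; for x in rice_cake: prefix.append(prefix[-1] + x)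
def prefixSums (a : List Int) : List Int :=
  a.foldl (fun p x => p ++ [PySem.List.pyGetD p (-1) 0 + x]) [0]

-- B's inner `while lo < hi` bisection for the first index with a[i] > h (fueled)
def bisectLoop (a : List Int) (h : Int) : Nat → Int → Int → Int
  | 0, lo, _ => lo
  | fuel + 1, lo, hi =>
    if lo < hi then
      let mid := PySem.Int.floordiv (lo + hi) 2
      if h < PySem.List.pyGetD a mid 0 then bisectLoop a h fuel lo mid
      else bisectLoop a h fuel (mid + 1) hi
    else lo

-- B's cut_total(h)
def cutTotal (a pfx : List Int) (n h : Int) : Int :=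
  let j := bisectLoop a h n.toNat 0 n
  PySem.List.pyGetD pfx n 0 - PySem.List.pyGetD pfx j 0 - (n - j) * h

-- B's outer `while lo <= hi` search keeping the best feasible height (fueled)
def altLoop (a pfx : List Int) (n m : Int) : Nat → Int → Int → Int → Int
  | 0, _, _, best => best
  | fuel + 1, lo, hi, best =>
    if lo ≤ hi then
      let mid := PySem.Int.floordiv (lo + hi) 2
      if m ≤ cutTotal a pfx n mid then altLoop a pfx n m fuel (mid + 1) hi mid
      else altLoop a pfx n m fuel lo (mid - 1) best
    else best

def solution_alt (m : Int) (rice_cake : List Int) : Int :=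
  let a := PySem.List.sorted rice_cake (fun x => x) false
  let n := PySem.List.len a
  let pfx := prefixSums a
  let hi := PySem.List.pyGetD a (-1) 0
  altLoop a pfx n m (hi + 1).toNat 0 hi 0

-- ===== PRECONDITION & SPEC =====
-- Pre_ excludes only the empty list, on which A raises IndexError (rice_cake[-1]).
def Pre_solution (m : Int) (rice_cake : List Int) : Prop := rice_cake ≠ []
instance (m : Int) (rice_cake : List Int) : Decidable (Pre_solution m rice_cake) := by unfold Pre_solution; infer_instance
def pvWitness_solution : Int × List Int := (6, [19, 15, 10, 17])

def Spec_solution (m : Int) (rice_cake : List Int) (out : Int) : Prop := out = solution_alt m rice_cake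
instance (m : Int) (rice_cake : List Int) (out : Int) : Decidable (Spec_solution m rice_cake out) := by unfold Spec_solution; infer_instance

-- ===== CLAIM (what is proved, stated in full; the proofs are below) =====
def Claim_equal_solution : Prop := ∀ (m : Int) (rice_cake : List Int), Dom_solution m rice_cake → Pre_solution m rice_cake → Spec_solution m rice_cake (solution m rice_cake)

-- ===== LEMMAS AND PROOFS =====

-- pvLen as a sum, and its order facts
theorem pvLen_eq_sum (a : List Int) (c : Int) :
    pvLen a c = (a.map (fun i => if c < i then i - c else 0)).sum := by
  have hfun : (fun (length i : Int) => if c < i then length + (i - c) else length)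
      = (fun (length i : Int) => length + (if c < i then i - c else 0)) := by
    funext l i; split <;> simp
  rw [pvLen, hfun, PySem.List.foldl_add, zero_add]

theorem pvLen_anti (a : List Int) {c d : Int} (h : c ≤ d) : pvLen a d ≤ pvLen a c := by
  rw [pvLen_eq_sum, pvLen_eq_sum]
  apply List.sum_le_sum
  intro i _
  split_ifs <;> omega

theorem pvLen_strict (a : List Int) {x c : Int} (hx : x ∈ a) (hcx : c < x) :
    pvLen a (c + 1) < pvLen a c := by
  obtain ⟨u, v, rfl⟩ := List.mem_iff_append.mp hx
  rw [pvLen_eq_sum, pvLen_eq_sum]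
  simp only [List.map_append, List.map_cons, List.sum_append, List.sum_cons]
  have hu : ((u.map fun i => if c + 1 < i then i - (c + 1) else 0)).sum
      ≤ ((u.map fun i => if c < i then i - c else 0)).sum := by
    apply List.sum_le_sum; intro i _; split_ifs <;> omega
  have hv : ((v.map fun i => if c + 1 < i then i - (c + 1) else 0)).sum
      ≤ ((v.map fun i => if c < i then i - c else 0)).sum := by
    apply List.sum_le_sum; intro i _; split_ifs <;> omega
  have hxterm : (if c + 1 < x then x - (c + 1) else 0) < (if c < x then x - c else 0) := by
    split_ifs <;> omega
  omega

-- elements of a sorted (Pairwise ≤) list around an index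
theorem pw_getElem_mono (a : List Int) (hpw : a.Pairwise (· ≤ ·)) {p q : Nat}
    (hq : q < a.length) (hpq : p ≤ q) : a[p]'(by omega) ≤ a[q] := by
  rcases Nat.lt_or_ge p q with h | h
  · exact List.pairwise_iff_getElem.mp hpw p q (by omega) hq h
  · have : p = q := by omega
    subst this; exact le_refl _

theorem sum_map_sub_const (l : List Int) (h : Int) :
    (l.map (fun i => i - h)).sum = l.sum - l.length * h := by
  induction l with
  | nil => simp
  | cons x t ih =>
    simp only [List.map_cons, List.sum_cons, List.length_cons, ih]
    push_cast
    ring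

-- cut total at h when the first j elements are ≤ h and the rest are > h
theorem pvLen_split (a : List Int) (j : Nat) (h : Int) (_hj : j ≤ a.length)
    (hlow : ∀ i ∈ a.take j, i ≤ h) (hup : ∀ i ∈ a.drop j, h < i) :
    pvLen a h = a.sum - (a.take j).sum - ((a.length : Int) - (j : Int)) * h := by
  have hsplit : a = a.take j ++ a.drop j := (List.take_append_drop j a).symm
  rw [pvLen_eq_sum]
  conv_lhs => rw [hsplit]
  rw [List.map_append, List.sum_append]
  have h1 : ((a.take j).map (fun i => if h < i then i - h else 0)).sum = 0 := by
    apply List.sum_eq_zero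
    intro y hy
    simp only [List.mem_map] at hy
    obtain ⟨i, hi, rfl⟩ := hy
    have := hlow i hi
    split_ifs <;> omega
  have h2 : ((a.drop j).map (fun i => if h < i then i - h else 0)).sum
      = ((a.drop j).map (fun i => i - h)).sum := by
    congr 1
    apply List.map_congr_left
    intro i hi
    rw [if_pos (hup i hi)]
  have hsum : (a.drop j).sum = a.sum - (a.take j).sum := by
    have := congrArg List.sum hsplit
    rw [List.sum_append] at this
    omega
  rw [h1, h2, zero_add, sum_map_sub_const, hsum]
  have hlen : ((a.drop j).length : Int) = (a.length : Int) - (j : Int) := by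
    simp only [List.length_drop]
    omega
  rw [hlen]

-- A's loop returns its initial answer when no cut height works
theorem loopNone (a : List Int) (m : Int)
    (hall : ∀ h : Int, 0 ≤ h → pvLen a h < m) :
    ∀ (fuel : Nat) (s e ans : Int), (e + 1 - s).toNat ≤ fuel → 0 ≤ s →
      solutionLoop a m fuel s e ans = ans := by
  intro fuel
  induction fuel with
  | zero =>
    intro s e ans hf hs
    rfl
  | succ f ih =>
    intro s e ans hf hs
    by_cases hse : s ≤ e
    · rw [solutionLoop, if_pos hse]
      have hb := PySem.Int.floordiv_two_mid_bounds hse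
      have hlt := hall (PySem.Int.floordiv (s + e) 2) (by omega)
      rw [if_neg (by omega), if_neg (by omega)]
      exact ih _ _ _ (by omega) hs
    · rw [solutionLoop, if_neg hse]

-- A's loop returns C when C is the greatest workable cut height (below hi)
theorem loopFound (a : List Int) (m : Int) (ha : a ≠ [])
    (C : Int) (_hC0 : 0 ≤ C) (hChi : C ≤ a.getLast ha) (hPC : m ≤ pvLen a C)
    (hmax : ∀ h : Int, C < h → h ≤ a.getLast ha → pvLen a h < m) :
    ∀ (fuel : Nat) (s e ans : Int), (e + 1 - s).toNat ≤ fuel → 0 ≤ s → s ≤ C + 1 →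
      C ≤ e → e ≤ a.getLast ha → (s = C + 1 → ans = C) → solutionLoop a m fuel s e ans = C := by
    intro fuel
    induction fuel with
    | zero =>
      intro s e ans hf hs hsC hCe hehi hans
      exact hans (by omega)
    | succ f ih =>
      intro s e ans hf hs hsC hCe hehi hans
      by_cases hse : s ≤ e
      · rw [solutionLoop, if_pos hse]
        have hb := PySem.Int.floordiv_two_mid_bounds hse
        set cut := PySem.Int.floordiv (s + e) 2 with hcut
        have hnotbig : m ≤ pvLen a cut → cut ≤ C := by
          intro hge
          by_contra hlt
          exact absurd hge (not_le.mpr (hmax cut (by omega) (by omega)))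
        have hCle : cut < C → pvLen a C < pvLen a cut := by
          intro hltC
          calc pvLen a C ≤ pvLen a (cut + 1) := pvLen_anti a (by omega)
            _ < pvLen a cut := pvLen_strict a (List.getLast_mem ha) (by omega)
        by_cases he : pvLen a cut = m
        · rw [if_pos he]
          have h1 : cut ≤ C := hnotbig (by omega)
          rcases eq_or_lt_of_le h1 with h2 | h2
          · exact h2
          · have := hCle h2
            omega
        · rw [if_neg he]
          by_cases hg : pvLen a cut > m
          · rw [if_pos hg]
            have h1 : cut ≤ C := hnotbig (by omega)
            exact ih (cut + 1) e cut (by omega) (by omega) (by omega) hCe hehi (fun hh => by omega)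
          · rw [if_neg hg]
            have h1 : C < cut := by
              by_contra hcc
              have := pvLen_anti a (le_of_not_gt hcc : cut ≤ C)
              omega
            exact ih s (cut - 1) ans (by omega) hs hsC (by omega) (by omega) hans
      · rw [solutionLoop, if_neg hse]
        exact hans (by omega)

-- the prefix list is the list of partial sums
theorem prefixSums_eq (a : List Int) :
    prefixSums a = (List.range (a.length + 1)).map (fun j => (a.take j).sum) := by
  induction a using List.reverseRecOn with
  | nil => simp [prefixSums]
  | append_singleton a x ih =>
    have hne : prefixSums a ≠ [] := by
      rw [ih]
      simp [List.range_succ]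
    have hlast : PySem.List.pyGetD (prefixSums a) (-1) 0 = a.sum := by
      rw [PySem.List.pyGetD_neg_one (prefixSums a) 0 hne]
      have h1 : (prefixSums a).getLast? = some a.sum := by
        rw [ih, List.getLast?_map, List.range_succ]
        simp
      have h2 := List.getLast?_eq_some_getLast hne
      rw [h2] at h1
      exact Option.some.inj h1
    rw [prefixSums, List.foldl_append]
    have hstep : prefixSums a ++ [PySem.List.pyGetD (prefixSums a) (-1) 0 + x]
        = prefixSums a ++ [a.sum + x] := by rw [hlast]
    show prefixSums a ++ [PySem.List.pyGetD (prefixSums a) (-1) 0 + x] = _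
    rw [hstep, ih]
    rw [List.length_append, List.length_cons, List.length_nil]
    have hr : List.range (a.length + 1 + 1) = List.range (a.length + 1) ++ [a.length + 1] := by
      rw [List.range_succ]
    rw [hr, List.map_append]
    congr 1
    · apply List.map_congr_left
      intro j hj
      rw [List.mem_range] at hj
      rw [List.take_append_of_le_length (by omega)]
    · simp [List.take_append_of_le_length, List.take_length]

theorem prefixSums_getD (a : List Int) (j : Int) (h0 : 0 ≤ j) (hj : j ≤ (a.length : Int)) :
    PySem.List.pyGetD (prefixSums a) j 0 = (a.take j.toNat).sum := by
  rw [prefixSums_eq, PySem.List.pyGetD_eq_getElem _ _ h0 (by simp; omega)]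
  rw [List.getElem_map, List.getElem_range]

-- B's bisection returns the count of elements ≤ h (sorted list)
theorem bisect_spec (a : List Int) (hpw : a.Pairwise (· ≤ ·)) (h : Int) :
    ∀ (fuel : Nat) (lo hi : Int), (hi - lo).toNat ≤ fuel → 0 ≤ lo → lo ≤ hi → hi ≤ (a.length : Int) →
    (∀ i : Nat, (i : Int) < lo → a.getD i 0 ≤ h) →
    (∀ i : Nat, hi ≤ (i : Int) → i < a.length → h < a.getD i 0) →
    ∃ j : Nat, bisectLoop a h fuel lo hi = (j : Int) ∧ j ≤ a.length ∧
      (∀ i : Nat, i < j → a.getD i 0 ≤ h) ∧ (∀ i : Nat, j ≤ i → i < a.length → h < a.getD i 0) := by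
  intro fuel
  induction fuel with
  | zero =>
    intro lo hi hf h0 hlh hhl Hlo Hhi
    refine ⟨lo.toNat, by simp [bisectLoop]; omega, by omega, ?_, ?_⟩
    · intro i hi'
      exact Hlo i (by omega)
    · intro i hi1 hi2
      exact Hhi i (by omega) hi2
  | succ f ih =>
    intro lo hi hf h0 hlh hhl Hlo Hhi
    by_cases hc : lo < hi
    · rw [bisectLoop, if_pos hc]
      have hb := PySem.Int.floordiv_two_mid_bounds (le_of_lt hc)
      set mid := PySem.Int.floordiv (lo + hi) 2 with hmid
      have hmlt : mid < hi := by
        have h2 := PySem.Int.floordiv_mul_add_mod (lo + hi) 2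
        have h3 : 0 ≤ PySem.Int.mod (lo + hi) 2 ∧ PySem.Int.mod (lo + hi) 2 < 2 := by
          constructor
          · have := PySem.Int.mod_eq_emod_of_pos (a := lo + hi) (b := 2) (by omega)
            rw [this]; omega
          · have := PySem.Int.mod_eq_emod_of_pos (a := lo + hi) (b := 2) (by omega)
            rw [this]; omega
        omega
      have hget : PySem.List.pyGetD a mid 0 = a.getD mid.toNat 0 := by
        rw [PySem.List.pyGetD_eq_getElem a 0 (by omega) (by omega),
          List.getD_eq_getElem a 0 (by omega)]
      by_cases hcmp : h < PySem.List.pyGetD a mid 0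
      · rw [if_pos hcmp]
        apply ih lo mid (by omega) h0 (by omega) (by omega) Hlo
        intro i hi1 hi2
        have hmono : a.getD mid.toNat 0 ≤ a.getD i 0 := by
          rw [List.getD_eq_getElem a 0 (by omega : mid.toNat < a.length),
            List.getD_eq_getElem a 0 hi2]
          exact pw_getElem_mono a hpw hi2 (by omega)
        rw [hget] at hcmp
        omega
      · rw [if_neg hcmp]
        apply ih (mid + 1) hi (by omega) (by omega) (by omega) hhl
        · intro i hi1
          have hmono : a.getD i 0 ≤ a.getD mid.toNat 0 := by
            rw [List.getD_eq_getElem a 0 (by omega : mid.toNat < a.length),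
              List.getD_eq_getElem a 0 (by omega : i < a.length)]
            exact pw_getElem_mono a hpw (by omega) (by omega)
          rw [hget] at hcmp
          omega
        · exact Hhi
    · rw [bisectLoop, if_neg hc]
      refine ⟨lo.toNat, by omega, by omega, ?_, ?_⟩
      · intro i hi'
        exact Hlo i (by omega)
      · intro i hi1 hi2
        exact Hhi i (by omega) hi2

-- hence B's cut_total computes A's inner-loop sum
theorem cutTotal_eq (a : List Int) (hpw : a.Pairwise (· ≤ ·)) (h : Int) :
    cutTotal a (prefixSums a) (a.length : Int) h = pvLen a h := by
  obtain ⟨j, hj, hjl, Hlo, Hhi⟩ := bisect_spec a hpw h a.length 0 (a.length : Int)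
    (by omega) (by omega) (by omega) (by omega)
    (by intro i hi'; omega) (by intro i hi1 hi2; omega)
  rw [cutTotal, Int.toNat_natCast]
  rw [hj, prefixSums_getD a _ (by omega) (by omega), prefixSums_getD a _ (by omega) (by omega)]
  have htn : ((a.length : Int)).toNat = a.length := by omega
  have hjn : ((j : Int)).toNat = j := by omega
  rw [htn, hjn, List.take_length]
  rw [pvLen_split a j h hjl]
  · intro i hi'
    obtain ⟨t, ht, rfl⟩ := List.mem_iff_getElem.mp hi'
    have htj : t < j := by simp at ht; omega
    have := Hlo t htj
    rw [List.getElem_take, ← List.getD_eq_getElem a 0]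
    exact this
  · intro i hi'
    obtain ⟨t, ht, rfl⟩ := List.mem_iff_getElem.mp hi'
    have hlt : j + t < a.length := by simp at ht; omega
    have := Hhi (j + t) (by omega) hlt
    rw [List.getElem_drop, ← List.getD_eq_getElem a 0]
    exact this

-- B's loop returns its initial best when no cut height works
theorem altLoopNone (a pfx : List Int) (n m : Int)
    (hct : ∀ h : Int, cutTotal a pfx n h = pvLen a h)
    (hall : ∀ h : Int, 0 ≤ h → pvLen a h < m) :
    ∀ (fuel : Nat) (lo hi best : Int), (hi + 1 - lo).toNat ≤ fuel → 0 ≤ lo →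
      altLoop a pfx n m fuel lo hi best = best := by
  intro fuel
  induction fuel with
  | zero =>
    intro lo hi best hf h0
    rfl
  | succ f ih =>
    intro lo hi best hf h0
    by_cases hc : lo ≤ hi
    · rw [altLoop, if_pos hc]
      have hb := PySem.Int.floordiv_two_mid_bounds hc
      have hlt := hall (PySem.Int.floordiv (lo + hi) 2) (by omega)
      simp only [hct]
      rw [if_neg (by omega)]
      exact ih _ _ _ (by omega) h0
    · rw [altLoop, if_neg hc]

-- B's loop returns C when C is the greatest workable cut height (below hi)
theorem altLoopFound (a pfx : List Int) (n m : Int) (ha : a ≠ [])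
    (hct : ∀ h : Int, cutTotal a pfx n h = pvLen a h)
    (C : Int) (_hC0 : 0 ≤ C) (hChi : C ≤ a.getLast ha) (hPC : m ≤ pvLen a C)
    (hmax : ∀ h : Int, C < h → h ≤ a.getLast ha → pvLen a h < m) :
    ∀ (fuel : Nat) (lo hi best : Int), (hi + 1 - lo).toNat ≤ fuel → 0 ≤ lo → lo ≤ C + 1 →
      C ≤ hi → hi ≤ a.getLast ha → (lo = C + 1 → best = C) →
      altLoop a pfx n m fuel lo hi best = C := by
  intro fuel
  induction fuel with
  | zero =>
    intro lo hi best hf h0 hlC hCh hhg hbest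
    exact hbest (by omega)
  | succ f ih =>
    intro lo hi best hf h0 hlC hCh hhg hbest
    by_cases hc : lo ≤ hi
    · rw [altLoop, if_pos hc]
      have hb := PySem.Int.floordiv_two_mid_bounds hc
      simp only [hct]
      set mid := PySem.Int.floordiv (lo + hi) 2 with hmid
      by_cases hfe : m ≤ pvLen a mid
      · rw [if_pos hfe]
        have hmC : mid ≤ C := by
          by_contra hlt
          exact absurd hfe (not_le.mpr (hmax mid (by omega) (by omega)))
        exact ih (mid + 1) hi mid (by omega) (by omega) (by omega) hCh hhg (fun hh => by omega)
      · rw [if_neg hfe]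
        have hCm : C < mid := by
          by_contra hcc
          have := pvLen_anti a (le_of_not_gt hcc : mid ≤ C)
          omega
        exact ih lo (mid - 1) best (by omega) h0 hlC (by omega) (by omega) hbest
    · rw [altLoop, if_neg hc]
      exact hbest (by omega)

-- ===== VERDICT (by name: the statement is the Claim_ definition above) =====
theorem solution_spec : Claim_equal_solution := by
  intro m rc hdom hpre
  unfold Spec_solution
  simp only [solution, solution_alt, PySem.List.len_eq]
  set a := PySem.List.sorted rc (fun x => x) false with hadef
  have ha : a ≠ [] := by
    rw [hadef]
    intro hcon
    exact hpre ((PySem.List.sorted_eq_nil_iff rc (fun x => x) false).mp hcon)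
  have hpw : a.Pairwise (· ≤ ·) := by
    rw [hadef]
    simpa using PySem.List.sorted_pairwise rc (fun x => x)
  have hlast : PySem.List.pyGetD a (-1) 0 = a.getLast ha := PySem.List.pyGetD_neg_one a 0 ha
  rw [hlast]
  have hct : ∀ h : Int, cutTotal a (prefixSums a) (a.length : Int) h = pvLen a h :=
    cutTotal_eq a hpw
  by_cases hneg : a.getLast ha < 0
  · have hf0 : (a.getLast ha + 1).toNat = 0 := by omega
    rw [hf0]
    rfl
  · by_cases hfeas : m ≤ pvLen a 0
    · set P : Nat → Prop := fun k => m ≤ pvLen a (k : Int) with hP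
      haveI hPdec : DecidablePred P := fun k => by rw [hP]; infer_instance
      set C : Int := (Nat.findGreatest P (a.getLast ha).toNat : Int) with hC
      have hC0 : 0 ≤ C := by rw [hC]; omega
      have hChi : C ≤ a.getLast ha := by
        rw [hC]
        have := Nat.findGreatest_le (P := P) (a.getLast ha).toNat
        omega
      have hPC : m ≤ pvLen a C := by
        rw [hC]
        exact Nat.findGreatest_spec (P := P) (Nat.zero_le _) (by rw [hP]; simpa using hfeas)
      have hmax : ∀ h : Int, C < h → h ≤ a.getLast ha → pvLen a h < m := by
        intro h hCh hhl
        have hh0 : 0 ≤ h := by omega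
        have hne := Nat.findGreatest_is_greatest (P := P)
          (show Nat.findGreatest P (a.getLast ha).toNat < h.toNat by omega) (by omega)
        have hne' : ¬ m ≤ pvLen a ((h.toNat : Int)) := hne
        have hcast : ((h.toNat : Int)) = h := by omega
        rw [hcast] at hne'
        omega
      rw [loopFound a m ha C hC0 hChi hPC hmax (a.getLast ha + 1).toNat 0 (a.getLast ha) 0
          (by omega) (by omega) (by omega) hChi (le_refl _) (by intro hcon; omega),
        altLoopFound a (prefixSums a) (a.length : Int) m ha hct C hC0 hChi hPC hmax
          (a.getLast ha + 1).toNat 0 (a.getLast ha) 0 (by omega) (by omega) (by omega)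
          hChi (le_refl _) (by intro hcon; omega)]
    · push_neg at hfeas
      have hall : ∀ h : Int, 0 ≤ h → pvLen a h < m := fun h hh =>
        lt_of_le_of_lt (pvLen_anti a hh) hfeas
      rw [loopNone a m hall (a.getLast ha + 1).toNat 0 (a.getLast ha) 0 (by omega) (by omega),
        altLoopNone a (prefixSums a) (a.length : Int) m hct hall (a.getLast ha + 1).toNat 0
          (a.getLast ha) 0 (by omega) (by omega)]
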